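-- pv_equiv track=rewrite | github.com/SENATOROVAI/Datascience_Vladislav | Python/projects/task_5.py | odd_even_numbers
-- ===== SOURCE A (Python) =====
-- def odd_even_numbers(digit):
--     """find odd and even"""
--
--     even = len([x for x in str(digit) if int(x) % 2 == 0])
--     odd = len([x for x in str(digit) if int(x) % 2 != 0])
--     if even > odd:
--         return 1
--     if even < odd:
--         return 0
--     return -1
-- ===== SOURCE B (Python) =====
-- def odd_even_numbers(digit):
--     """find odd and even (single-pass running balance)"""
--     balance = 0
--     for c in str(digit):
--         if int(c) % 2 == 0:
--             balance += 1
--         else: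
--             balance -= 1
--     if balance > 0:
--         return 1
--     if balance < 0:
--         return 0
--     return -1
-- ===== Notes on version B (the rewrite author's own statement) =====
-- stated objective: simpler
-- what changed: Replaces A's two separate filtering list-comprehension passes (then comparing the two lengths) with one explicit loop keeping a single running even-minus-odd balance whose sign decides the result.
import Mathlib
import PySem

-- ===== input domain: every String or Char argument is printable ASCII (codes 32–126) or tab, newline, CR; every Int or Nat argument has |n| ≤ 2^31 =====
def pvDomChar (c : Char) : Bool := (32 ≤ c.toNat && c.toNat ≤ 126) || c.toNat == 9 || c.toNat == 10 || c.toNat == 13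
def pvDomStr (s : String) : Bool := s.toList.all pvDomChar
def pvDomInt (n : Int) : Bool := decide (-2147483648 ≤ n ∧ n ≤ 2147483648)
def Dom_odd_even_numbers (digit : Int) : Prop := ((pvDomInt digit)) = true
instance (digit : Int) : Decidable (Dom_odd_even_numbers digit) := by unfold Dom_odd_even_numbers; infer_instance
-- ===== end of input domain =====

-- B replaces A's two filtering passes by a single-pass running balance; return value only, objective: simpler.

-- ===== PORT A =====
-- int(x) for a single character x of str(digit); inside Pre_ (digit ≥ 0) every
-- character is a decimal digit, so ofStr? is always `some` and getD 0 is never taken.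
def pvCharInt (c : Char) : Int := (PySem.Int.ofChars? [c]).getD 0

def odd_even_numbers (digit : Int) : Int :=
  let even := ((PySem.Int.toChars digit).filter (fun x => PySem.Int.mod (pvCharInt x) 2 == 0)).length
  let odd := ((PySem.Int.toChars digit).filter (fun x => PySem.Int.mod (pvCharInt x) 2 != 0)).length
  if even > odd then 1
  else if even < odd then 0
  else -1

-- ===== PORT B =====
-- loop body of B: balance += 1 on an even digit char, -= 1 otherwise
def pvStep (b : Int) (c : Char) : Int :=
  if PySem.Int.mod (pvCharInt c) 2 == 0 then b + 1 else b - 1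

def odd_even_numbers_alt (digit : Int) : Int :=
  let balance := (PySem.Int.toChars digit).foldl pvStep 0
  if balance > 0 then 1
  else if balance < 0 then 0
  else -1

-- ===== PRECONDITION & SPEC =====
-- Pre_ excludes negative digit, where str(digit) starts with '-' and int('-') raises ValueError in both A and B.
def Pre_odd_even_numbers (digit : Int) : Prop := 0 ≤ digit
instance (digit : Int) : Decidable (Pre_odd_even_numbers digit) := by unfold Pre_odd_even_numbers; infer_instance
def pvWitness_odd_even_numbers : Int := 248

def Spec_odd_even_numbers (digit : Int) (out : Int) : Prop := out = odd_even_numbers_alt digit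
instance (digit : Int) (out : Int) : Decidable (Spec_odd_even_numbers digit out) := by unfold Spec_odd_even_numbers; infer_instance

-- ===== CLAIM (what is proved, stated in full; the proofs are below) =====
def Claim_equal_odd_even_numbers : Prop := ∀ (digit : Int), Dom_odd_even_numbers digit → Pre_odd_even_numbers digit → Spec_odd_even_numbers digit (odd_even_numbers digit)

-- ===== LEMMAS AND PROOFS =====

-- B's running balance counts +1 on even-digit chars, -1 on the rest.
theorem balance_eq_countP (l : List Char) (b : Int) :
    l.foldl pvStep b
      = b + (l.countP (fun c => PySem.Int.mod (pvCharInt c) 2 == 0) : Int)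
          - (l.countP (fun c => PySem.Int.mod (pvCharInt c) 2 != 0) : Int) := by
  induction l generalizing b with
  | nil => simp
  | cons c l ih =>
    rw [List.foldl_cons, List.countP_cons, List.countP_cons, ih]
    have hq : (PySem.Int.mod (pvCharInt c) 2 != 0) = !(PySem.Int.mod (pvCharInt c) 2 == 0) := rfl
    unfold pvStep
    rw [hq]
    by_cases h : (PySem.Int.mod (pvCharInt c) 2 == 0) = true
    · rw [h]; simp only [Bool.not_true, reduceIte]; push_cast; ring
    · rw [Bool.not_eq_true] at h; rw [h]; simp only [Bool.not_false, reduceIte]; push_cast; ring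

theorem odd_even_numbers_spec : Claim_equal_odd_even_numbers := by
  intro digit _ _
  unfold Spec_odd_even_numbers odd_even_numbers odd_even_numbers_alt
  simp only []
  rw [balance_eq_countP]
  simp only [List.countP_eq_length_filter]
  split_ifs <;> omega

-- ===== VERDICT (by name: the statement is the Claim_ definition above) =====
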